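-- pv_equiv track=rewrite | github.com/DaniloSorano/PassNet | Events Matrix/jsonToTargetMatrix.py | accurate_pass
-- ===== SOURCE A (Python) =====
-- def accurate_pass(event_tags):
--     accurate = False
--     tag_ids = set()
--     tags = event_tags
--     for tag in tags:
--         tag_ids.add(tag['id'])
--     if 1801 in tag_ids:
--         accurate = True
--     return accurate
-- ===== SOURCE B (Python) =====
-- def accurate_pass(event_tags):
--     n = len(event_tags)
--     if n == 0:
--         return False
--     if n == 1:
--         return event_tags[0]['id'] == 1801
--     mid = n // 2
--     return accurate_pass(event_tags[:mid]) or accurate_pass(event_tags[mid:])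
-- ===== Notes on version B (the rewrite author's own statement) =====
-- stated objective: alternative
-- what changed: B is a divide-and-conquer recursion that splits the tag list in half and combines the halves with a short-circuit 'or', instead of A's iterative pass that materialises a set of all ids and then tests membership.
import Mathlib
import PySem

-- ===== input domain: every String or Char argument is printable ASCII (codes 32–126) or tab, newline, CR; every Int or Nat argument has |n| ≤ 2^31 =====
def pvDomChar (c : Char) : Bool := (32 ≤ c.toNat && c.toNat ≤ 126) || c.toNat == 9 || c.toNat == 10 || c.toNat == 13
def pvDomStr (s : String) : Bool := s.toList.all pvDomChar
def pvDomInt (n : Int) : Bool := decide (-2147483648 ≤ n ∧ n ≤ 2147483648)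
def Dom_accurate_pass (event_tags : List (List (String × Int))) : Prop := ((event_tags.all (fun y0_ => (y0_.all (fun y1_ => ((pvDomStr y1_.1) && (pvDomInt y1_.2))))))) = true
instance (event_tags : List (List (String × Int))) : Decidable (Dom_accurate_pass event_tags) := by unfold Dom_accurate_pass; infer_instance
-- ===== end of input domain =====

-- B replaces A's build-a-set-of-ids-then-test-membership pass with a divide-and-conquer recursion on halves of the list (alternative decomposition, same cost).

-- ===== PORT A =====
-- tag['id'] is ported as Dict.getD tag "id" 0: Pre_ restricts to inputs where every tag
-- has the key "id", so the default is never read on admitted inputs (A raises KeyError otherwise).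
def accurate_pass (event_tags : List (List (String × Int))) : Bool :=
  let tag_ids : PySem.Set Int :=
    event_tags.foldl (fun s tag => PySem.Set.add s (PySem.Dict.getD (PySem.Dict.mk tag) "id" 0)) PySem.Set.empty
  if PySem.Set.contains tag_ids 1801 then true else false

-- ===== PORT B =====
-- event_tags[:mid] / event_tags[mid:] with 0 ≤ mid ≤ n are exactly List.take / List.drop.
def accurate_pass_alt (event_tags : List (List (String × Int))) : Bool :=
  match event_tags with
  | [] => false
  | [tag] => PySem.Dict.getD (PySem.Dict.mk tag) "id" 0 == 1801
  | a :: b :: rest =>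
      let l := a :: b :: rest
      let mid := l.length / 2
      accurate_pass_alt (l.take mid) || accurate_pass_alt (l.drop mid)
termination_by event_tags.length
decreasing_by
  · simp [List.length_take]; omega
  · simp [List.length_drop]; omega

-- ===== PRECONDITION & SPEC =====
-- Pre_ excludes exactly the inputs where a tag lacks the key "id": Python A raises KeyError there.
def Pre_accurate_pass (event_tags : List (List (String × Int))) : Prop :=
  (event_tags.all (fun tag => PySem.Dict.contains (PySem.Dict.mk tag) "id")) = true
instance (event_tags : List (List (String × Int))) : Decidable (Pre_accurate_pass event_tags) := by
  unfold Pre_accurate_pass; infer_instance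
def pvWitness_accurate_pass : (List (List (String × Int))) := [[("id", 1801)], [("id", 3)]]

def Spec_accurate_pass (event_tags : List (List (String × Int))) (out : Bool) : Prop := out = accurate_pass_alt event_tags
instance (event_tags : List (List (String × Int))) (out : Bool) : Decidable (Spec_accurate_pass event_tags out) := by unfold Spec_accurate_pass; infer_instance

-- ===== CLAIM (what is proved, stated in full; the proofs are below) =====
def Claim_equal_accurate_pass : Prop := ∀ (event_tags : List (List (String × Int))), Dom_accurate_pass event_tags → Pre_accurate_pass event_tags → Spec_accurate_pass event_tags (accurate_pass event_tags)

-- ===== LEMMAS AND PROOFS =====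
-- B's divide-and-conquer computes List.any of "id equals 1801".
lemma alt_eq_any (l : List (List (String × Int))) :
    accurate_pass_alt l = l.any (fun tag => PySem.Dict.getD (PySem.Dict.mk tag) "id" 0 == 1801) := by
  induction l using accurate_pass_alt.induct with
  | case1 => simp [accurate_pass_alt]
  | case2 tag => simp [accurate_pass_alt]
  | case3 a b rest l mid ih1 ih2 =>
      rw [accurate_pass_alt]
      rw [ih1, ih2, ← List.any_append, List.take_append_drop]

-- Loop invariant for A: 1801 is in the accumulated set iff it was already there or some remaining tag has id 1801.
lemma fold_mem_iff (l : List (List (String × Int))) (s : PySem.Set Int) :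
    ((1801 : Int) ∈ l.foldl (fun s tag => PySem.Set.add s (PySem.Dict.getD (PySem.Dict.mk tag) "id" 0)) s)
      ↔ ((1801 : Int) ∈ s ∨ l.any (fun tag => PySem.Dict.getD (PySem.Dict.mk tag) "id" 0 == 1801) = true) := by
  induction l generalizing s with
  | nil => simp
  | cons tag rest ih =>
    simp only [List.foldl_cons, List.any_cons, ih, PySem.Set.mem_add, Bool.or_eq_true, beq_iff_eq]
    constructor
    · rintro (⟨hs | he⟩ | hb)
      · exact Or.inl hs
      · exact Or.inr (Or.inl he.symm)
      · exact Or.inr (Or.inr hb)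
    · rintro (hs | he | hb)
      · exact Or.inl (Or.inl hs)
      · exact Or.inl (Or.inr he.symm)
      · exact Or.inr hb

-- ===== VERDICT (by name: the statement is the Claim_ definition above) =====
theorem accurate_pass_spec : Claim_equal_accurate_pass := by
  intro l _ _
  unfold Spec_accurate_pass accurate_pass
  rw [alt_eq_any]
  have h := fold_mem_iff l PySem.Set.empty
  simp only [PySem.Set.empty, List.not_mem_nil, false_or] at h
  by_cases hb : l.any (fun tag => PySem.Dict.getD (PySem.Dict.mk tag) "id" 0 == 1801) = true
  · simp [PySem.Set.contains_eq_listContains, h.mpr hb, hb]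
  · simp only [Bool.not_eq_true] at hb
    have hm : ¬ ((1801 : Int) ∈ l.foldl
        (fun s tag => PySem.Set.add s (PySem.Dict.getD (PySem.Dict.mk tag) "id" 0)) ([] : PySem.Set Int)) := by
      intro hmm; rw [h] at hmm; simp [hmm] at hb
    simp [PySem.Set.contains_eq_listContains, hm, hb]
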